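-- pv_equiv track=rewrite | github.com/smallwanderer/smallwanderer-bkjhub | 프로그래머스/5/81305. 시험장 나누기/시험장 나누기.py | solution
-- ===== SOURCE A (Python) =====
-- def solution(k, num, links):
--     # links에서 루트 노드 찾기
--     nodes = range(len(links)) # 0-based
--     used = {x for a, b in links for x in (a, b) if x != -1}
--     root = (set(nodes) - used).pop()
--
--     weights = [[0, 0] for _ in range(len(links))]  # [왼쪽 자식 weight 합, 오른쪽 자식 weight 합]
--     # 왜 dfs? 각 노드의 자식 노드들의 weight 합을 알아야 하기 때문
--     def feasible(limit):
--         INF = 10**18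
--
--         def dfs(node):
--             if node == -1:
--                 return 0, 0 # groups, carry
--
--             lg, lc = dfs(links[node][0])
--             rg, rc = dfs(links[node][1])
--
--             if num[node] > limit:
--                 return INF, 0
--
--             groups = lg + rg
--             carry = num[node]
--
--             children = []
--             if links[node][0] != -1:
--                 children.append(lc)
--             if links[node][1] != -1:
--                 children.append(rc)
--
--             children.sort()
--             for s in children:
--                 if carry + s > limit:
--                     groups += 1
--                 else:
--                     carry += s
--
--             return groups, carry
--         g, _ = dfs(root)
--         return g+1 <= k
--
--     left, right = max(num), sum(num)
--     while left < right:
--         mid = (left + right) // 2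
--
--         if feasible(mid):
--             right = mid
--         else:
--             left = mid + 1
--     return left
-- ===== SOURCE B (Python) =====
-- def solution(k, num, links):
--     n = len(links)
--     used = {x for a, b in links for x in (a, b) if x != -1}
--     root = min(set(range(n)) - used)
--
--     def feasible(limit):
--         INF = 10**18
--         res = {}
--         stack = [(root, False)]
--         while stack:
--             node, ready = stack.pop()
--             l, r = links[node]
--             if not ready:
--                 stack.append((node, True))
--                 if r != -1:
--                     stack.append((r, False))
--                 if l != -1:
--                     stack.append((l, False))
--             else:
--                 lg, lc = res.get(l, (0, 0)) if l != -1 else (0, 0)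
--                 rg, rc = res.get(r, (0, 0)) if r != -1 else (0, 0)
--                 if num[node] > limit:
--                     res[node] = (INF, 0)
--                     continue
--                 groups = lg + rg
--                 carry = num[node]
--                 children = []
--                 if l != -1:
--                     children.append(lc)
--                 if r != -1:
--                     children.append(rc)
--                 children.sort()
--                 for s in children:
--                     if carry + s > limit:
--                         groups += 1
--                     else:
--                         carry += s
--                 res[node] = (groups, carry)
--         return res[root][0] + 1 <= k
--
--     left, right = max(num), sum(num)
--     while left < right:
--         mid = (left + right) // 2
--         if feasible(mid):
--             right = mid
--         else:
--             left = mid + 1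
--     return left
-- ===== Notes on version B (the rewrite author's own statement) =====
-- stated objective: alternative
-- what changed: The per-limit recursive dfs is replaced by an iterative explicit-stack post-order traversal that stores each node's (groups, carry) pair in a dict and combines children from that dict; the binary search on the answer and the greedy carry merge are unchanged.
-- outside the precondition, e.g. on solution(2, [1, 2, 3], [[1, 2], [-1, -1], [1, -1]]): A returns 5, B returns 5
import Mathlib
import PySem

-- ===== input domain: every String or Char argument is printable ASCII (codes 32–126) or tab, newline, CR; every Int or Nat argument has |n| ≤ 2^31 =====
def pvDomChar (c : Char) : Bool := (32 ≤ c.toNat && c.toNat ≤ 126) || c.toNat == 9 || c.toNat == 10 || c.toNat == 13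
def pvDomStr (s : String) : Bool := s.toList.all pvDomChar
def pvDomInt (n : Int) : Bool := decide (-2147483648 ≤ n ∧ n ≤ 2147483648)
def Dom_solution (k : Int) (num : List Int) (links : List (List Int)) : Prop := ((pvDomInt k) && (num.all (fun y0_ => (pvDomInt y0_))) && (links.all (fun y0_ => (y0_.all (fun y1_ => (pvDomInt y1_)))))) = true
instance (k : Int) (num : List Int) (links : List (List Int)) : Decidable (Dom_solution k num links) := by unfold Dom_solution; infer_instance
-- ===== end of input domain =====

-- B replaces A's per-limit recursive dfs by an iterative explicit-stack post-order
-- traversal with a node→(groups, carry) dict (objective: alternative; same greedy merge,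
-- same binary search on the answer).

-- ===== PORT A =====

-- links[node][i] (row defaults are never used under Pre_, where node and i are in range)
def childA (links : List (List Int)) (node i : Int) : Int :=
  PySem.List.pyGetD (PySem.List.pyGetD links node []) i (-1)

-- the recursive dfs of A; fuel bounds the recursion depth (≤ number of nodes under Pre_)
def dfsA (num : List Int) (links : List (List Int)) (limit : Int) : Nat → Int → Int × Int
  | 0, _ => (0, 0)
  | fuel + 1, node =>
    if node = -1 then (0, 0)
    else
      let lp := dfsA num links limit fuel (childA links node 0)
      let rp := dfsA num links limit fuel (childA links node 1)
      if PySem.List.pyGetD num node 0 > limit then (1000000000000000000, 0)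
      else
        let children := (if childA links node 0 ≠ -1 then [lp.2] else []) ++
                        (if childA links node 1 ≠ -1 then [rp.2] else [])
        (PySem.List.sorted children id false).foldl
          (fun gc s => if gc.2 + s > limit then (gc.1 + 1, gc.2) else (gc.1, gc.2 + s))
          (lp.1 + rp.1, PySem.List.pyGetD num node 0)

def feasibleA (k : Int) (num : List Int) (links : List (List Int)) (root limit : Int) : Bool :=
  decide ((dfsA num links limit (links.length + 1) root).1 + 1 ≤ k)

-- the while left < right loop; fuel (right-left)+1 always suffices (the interval shrinks each turn)
def bsearchA (k : Int) (num : List Int) (links : List (List Int)) (root : Int) :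
    Nat → Int → Int → Int
  | 0, left, _ => left
  | fuel + 1, left, right =>
    if left < right then
      if feasibleA k num links root (PySem.Int.floordiv (left + right) 2) then
        bsearchA k num links root fuel left (PySem.Int.floordiv (left + right) 2)
      else
        bsearchA k num links root fuel (PySem.Int.floordiv (left + right) 2 + 1) right
    else left

def usedA (links : List (List Int)) : PySem.Set Int :=
  PySem.Set.ofList (links.flatten.filter (fun x => x != -1))

def solution (k : Int) (num : List Int) (links : List (List Int)) : Int :=
  -- set.pop(): exact under Pre_, where set(nodes) - used is a singleton
  let root := (PySem.Set.diff
      (PySem.Set.ofList (PySem.List.pyRange 0 (PySem.List.len links) 1)) (usedA links)).headD 0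
  let left := (PySem.List.max? num id).getD 0
  let right := num.sum
  bsearchA k num links root ((right - left).toNat + 1) left right

-- ===== PORT B =====

def childB (links : List (List Int)) (node i : Int) : Int :=
  PySem.List.pyGetD (PySem.List.pyGetD links node []) i (-1)

def usedB (links : List (List Int)) : PySem.Set Int :=
  PySem.Set.ofList (links.flatten.filter (fun x => x != -1))

-- the 'ready' branch of the stack loop: combine the children's stored results
def combineB (num : List Int) (links : List (List Int)) (limit : Int)
    (res : PySem.Dict Int (Int × Int)) (node : Int) : Int × Int :=
  let l := childB links node 0
  let r := childB links node 1
  let lp := if l ≠ -1 then res.getD l (0, 0) else ((0 : Int), (0 : Int))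
  let rp := if r ≠ -1 then res.getD r (0, 0) else ((0 : Int), (0 : Int))
  if PySem.List.pyGetD num node 0 > limit then (1000000000000000000, 0)
  else
    let children := (if l ≠ -1 then [lp.2] else []) ++ (if r ≠ -1 then [rp.2] else [])
    (PySem.List.sorted children id false).foldl
      (fun gc s => if gc.2 + s > limit then (gc.1 + 1, gc.2) else (gc.1, gc.2 + s))
      (lp.1 + rp.1, PySem.List.pyGetD num node 0)

-- the while stack loop; fuel 2n+1 always suffices under Pre_ (each node is pushed once)
def runB (num : List Int) (links : List (List Int)) (limit : Int) :
    Nat → List (Int × Bool) → PySem.Dict Int (Int × Int) → PySem.Dict Int (Int × Int)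
  | 0, _, res => res
  | _ + 1, [], res => res
  | fuel + 1, (node, ready) :: st, res =>
    if ready then
      runB num links limit fuel st (res.insert node (combineB num links limit res node))
    else
      let l := childB links node 0
      let r := childB links node 1
      let st1 := (node, true) :: st
      let st2 := if r ≠ -1 then (r, false) :: st1 else st1
      let st3 := if l ≠ -1 then (l, false) :: st2 else st2
      runB num links limit fuel st3 res

def feasibleB (k : Int) (num : List Int) (links : List (List Int)) (root limit : Int) : Bool :=
  let res := runB num links limit (2 * links.length + 1) [(root, false)] PySem.Dict.empty
  decide ((res.getD root (0, 0)).1 + 1 ≤ k)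

def bsearchB (k : Int) (num : List Int) (links : List (List Int)) (root : Int) :
    Nat → Int → Int → Int
  | 0, left, _ => left
  | fuel + 1, left, right =>
    if left < right then
      if feasibleB k num links root (PySem.Int.floordiv (left + right) 2) then
        bsearchB k num links root fuel left (PySem.Int.floordiv (left + right) 2)
      else
        bsearchB k num links root fuel (PySem.Int.floordiv (left + right) 2 + 1) right
    else left

def solution_alt (k : Int) (num : List Int) (links : List (List Int)) : Int :=
  -- min() of the root set: exact (order-independent consumption of the set)
  let root := (PySem.List.min? (PySem.Set.diff
      (PySem.Set.ofList (PySem.List.pyRange 0 (PySem.List.len links) 1)) (usedB links)) id).getD 0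
  let left := (PySem.List.max? num id).getD 0
  let right := num.sum
  bsearchB k num links root ((right - left).toNat + 1) left right

-- ===== PRECONDITION & SPEC =====

-- the child entries of links that are not -1, in order
def Elist (links : List (List Int)) : List Int := links.flatten.filter (fun x => x != -1)

-- Pre_ admits exactly the inputs this file's claim is about: rows of length 2 (else A's
-- unpacking raises), a nonempty num (else max raises), some parentless node (else set.pop
-- raises), and then EITHER sum(num) ≤ max(num) — the binary-search interval is empty, no
-- dfs ever runs — OR a well-formed binary tree/forest (distinct in-range child entries,
-- a unique root, num covering every node).  Outside Pre_, A raises (bad row shape, empty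
-- root set, unbounded recursion on a reachable cycle, missing num entry) or, on a
-- multi-root or shared-child forest that does reach the dfs, returns a value hanging on
-- CPython's accidental set.pop hash order and on re-visiting shared nodes.
def Pre_solution (k : Int) (num : List Int) (links : List (List Int)) : Prop :=
  1 ≤ links.length ∧ 1 ≤ num.length ∧ (∀ row ∈ links, row.length = 2) ∧
  (∃ u ∈ List.range links.length, ((u : Int) ∉ Elist links)) ∧
  (num.sum ≤ (PySem.List.max? num id).getD 0 ∨
    (links.length ≤ num.length ∧ (Elist links).Nodup ∧
     (∀ x ∈ Elist links, 0 ≤ x ∧ x < (links.length : Int)) ∧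
     (∃ u ∈ List.range links.length, ((u : Int) ∉ Elist links ∧
       ∀ v ∈ List.range links.length, ((v : Int) ∉ Elist links → v = u)))))

instance (k : Int) (num : List Int) (links : List (List Int)) : Decidable (Pre_solution k num links) := by
  unfold Pre_solution; infer_instance

def pvWitness_solution : Int × List Int × List (List Int) := (1, [1], [[-1, -1]])

def Spec_solution (k : Int) (num : List Int) (links : List (List Int)) (out : Int) : Prop :=
  out = solution_alt k num links
instance (k : Int) (num : List Int) (links : List (List Int)) (out : Int) : Decidable (Spec_solution k num links out) := by
  unfold Spec_solution; infer_instance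

-- ===== CLAIM (what is proved, stated in full; the proofs are below) =====
def Claim_equal_solution : Prop := ∀ (k : Int) (num : List Int) (links : List (List Int)), Dom_solution k num links → Pre_solution k num links → Spec_solution k num links (solution k num links)


-- ===== LEMMAS AND PROOFS =====

-- proof-side binary tree mirroring the part of `links` reachable from the root
inductive BT where
  | nil : BT
  | nd : Int → BT → BT → BT

def nodesT : BT → List Int
  | .nil => []
  | .nd i l r => i :: (nodesT l ++ nodesT r)

def sizeT : BT → Nat
  | .nil => 0
  | .nd _ l r => 1 + sizeT l + sizeT r

def htT : BT → Nat
  | .nil => 0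
  | .nd _ l r => 1 + max (htT l) (htT r)

-- `t` is exactly what A's dfs explores from `node`
inductive RepT (links : List (List Int)) : Int → BT → Prop where
  | nil : RepT links (-1) BT.nil
  | nd {node : Int} {l r : BT} (h : node ≠ -1)
      (hl : RepT links (childA links node 0) l) (hr : RepT links (childA links node 1) r) :
      RepT links node (BT.nd node l r)

-- the dfs value, defined structurally on the tree
def dfsT (num : List Int) (links : List (List Int)) (limit : Int) : BT → Int × Int
  | .nil => (0, 0)
  | .nd i l r =>
    let lp := dfsT num links limit l
    let rp := dfsT num links limit r
    if PySem.List.pyGetD num i 0 > limit then (1000000000000000000, 0)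
    else
      let children := (if childA links i 0 ≠ -1 then [lp.2] else []) ++
                      (if childA links i 1 ≠ -1 then [rp.2] else [])
      (PySem.List.sorted children id false).foldl
        (fun gc s => if gc.2 + s > limit then (gc.1 + 1, gc.2) else (gc.1, gc.2 + s))
        (lp.1 + rp.1, PySem.List.pyGetD num i 0)

theorem childB_eq (links : List (List Int)) (node i : Int) :
    childB links node i = childA links node i := rfl

theorem rep_of_ne (links : List (List Int)) (node : Int) (t : BT)
    (h : RepT links node t) (hne : node ≠ -1) :
    ∃ l r, t = BT.nd node l r ∧ RepT links (childA links node 0) l ∧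
      RepT links (childA links node 1) r := by
  cases h with
  | nil => exact absurd rfl hne
  | nd h hl hr => exact ⟨_, _, rfl, hl, hr⟩

theorem rep_neg_one (links : List (List Int)) (t : BT) (h : RepT links (-1) t) : t = BT.nil := by
  cases h with
  | nil => rfl
  | nd h hl hr => exact absurd rfl h

theorem dfsA_eq_dfsT (num : List Int) (links : List (List Int)) (limit : Int)
    (node : Int) (t : BT) (h : RepT links node t) :
    ∀ f : Nat, htT t ≤ f → dfsA num links limit f node = dfsT num links limit t := by
  induction h with
  | nil =>
    intro f _
    cases f with
    | zero => rfl
    | succ f => simp [dfsA, dfsT]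
  | @nd node l r hne hl hr ihl ihr =>
    intro f hf
    cases f with
    | zero => simp [htT] at hf
    | succ f =>
      have h1 : htT l ≤ f := by simp [htT] at hf; omega
      have h2 : htT r ≤ f := by simp [htT] at hf; omega
      simp only [dfsA, dfsT, if_neg hne, ihl f h1, ihr f h2]

-- tabT t d: the results dict after the machine has processed all of t
def tabT (num : List Int) (links : List (List Int)) (limit : Int) :
    BT → PySem.Dict Int (Int × Int) → PySem.Dict Int (Int × Int)
  | .nil, d => d
  | .nd i l r, d =>
    (tabT num links limit r (tabT num links limit l d)).insert i
      (dfsT num links limit (BT.nd i l r))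

theorem tabT_getD_notmem (num : List Int) (links : List (List Int)) (limit : Int)
    (t : BT) (d : PySem.Dict Int (Int × Int)) (x : Int) (hx : x ∉ nodesT t) (z : Int × Int) :
    (tabT num links limit t d).getD x z = d.getD x z := by
  induction t generalizing d with
  | nil => rfl
  | nd i l r ihl ihr =>
    simp only [nodesT, List.mem_cons, List.mem_append] at hx
    push_neg at hx
    simp only [tabT]
    rw [PySem.Dict.getD_insert_of_ne _ _ _ hx.1, ihr _ hx.2.2, ihl _ hx.2.1]

theorem runB_nil (num : List Int) (links : List (List Int)) (limit : Int)
    (f : Nat) (d : PySem.Dict Int (Int × Int)) : runB num links limit f [] d = d := by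
  cases f <;> rfl

theorem combineB_eq (num : List Int) (links : List (List Int)) (limit : Int)
    (node : Int) (l r : BT) (hl : RepT links (childA links node 0) l)
    (hr : RepT links (childA links node 1) r)
    (hnd : (nodesT (BT.nd node l r)).Nodup)
    (d : PySem.Dict Int (Int × Int)) :
    combineB num links limit
      (tabT num links limit r (tabT num links limit l d)) node =
      dfsT num links limit (BT.nd node l r) := by
  simp only [nodesT, List.nodup_cons, List.nodup_append] at hnd
  have lpEq : (if childA links node 0 ≠ -1 then
      (tabT num links limit r (tabT num links limit l d)).getD (childA links node 0) (0, 0)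
      else ((0 : Int), (0 : Int))) = dfsT num links limit l := by
    by_cases hL : childA links node 0 = -1
    · rw [rep_neg_one links l (hL ▸ hl)]
      simp [hL, dfsT]
    · obtain ⟨ll, lr, rfl, _, _⟩ := rep_of_ne links _ l hl hL
      rw [if_pos hL]
      have hnotr : childA links node 0 ∉ nodesT r := by
        intro hmem
        exact (hnd.2.2.2 (childA links node 0) (by simp [nodesT]) _ hmem) rfl
      rw [tabT_getD_notmem num links limit r _ _ hnotr]
      simp only [tabT]
      rw [PySem.Dict.getD_insert_self]
  have rpEq : (if childA links node 1 ≠ -1 then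
      (tabT num links limit r (tabT num links limit l d)).getD (childA links node 1) (0, 0)
      else ((0 : Int), (0 : Int))) = dfsT num links limit r := by
    by_cases hR : childA links node 1 = -1
    · rw [rep_neg_one links r (hR ▸ hr)]
      simp [hR, dfsT]
    · obtain ⟨rl, rr, rfl, _, _⟩ := rep_of_ne links _ r hr hR
      rw [if_pos hR]
      simp only [tabT]
      rw [PySem.Dict.getD_insert_self]
  simp only [combineB, childB_eq]
  rw [lpEq, rpEq]
  simp only [dfsT]

-- the machine lemma: processing one pushed node = recording its whole subtree
theorem runB_step (num : List Int) (links : List (List Int)) (limit : Int)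
    (node : Int) (t : BT) (h : RepT links node t) (hne : node ≠ -1)
    (hnd : (nodesT t).Nodup) :
    ∀ (f : Nat) (st : List (Int × Bool)) (d : PySem.Dict Int (Int × Int)),
      runB num links limit (2 * sizeT t + f) ((node, false) :: st) d =
        runB num links limit f st (tabT num links limit t d) := by
  induction h with
  | nil => exact absurd rfl hne
  | @nd node l r hne0 hl hr ihl ihr =>
    intro f st d
    have hnds : (nodesT (BT.nd node l r)).Nodup := hnd
    simp only [nodesT, List.nodup_cons, List.nodup_append] at hnd
    have stepL : ∀ (f : Nat) (st : List (Int × Bool)) (d : PySem.Dict Int (Int × Int)),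
        runB num links limit (2 * sizeT l + f)
          (if childA links node 0 ≠ -1 then (childA links node 0, false) :: st else st) d =
          runB num links limit f st (tabT num links limit l d) := by
      by_cases hL : childA links node 0 = -1
      · intro f st d
        rw [rep_neg_one links l (hL ▸ hl)]
        simp [hL, sizeT, tabT]
      · intro f st d
        rw [if_pos hL]
        exact ihl hL hnd.2.1 f st d
    have stepR : ∀ (f : Nat) (st : List (Int × Bool)) (d : PySem.Dict Int (Int × Int)),
        runB num links limit (2 * sizeT r + f)
          (if childA links node 1 ≠ -1 then (childA links node 1, false) :: st else st) d =
          runB num links limit f st (tabT num links limit r d) := by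
      by_cases hR : childA links node 1 = -1
      · intro f st d
        rw [rep_neg_one links r (hR ▸ hr)]
        simp [hR, sizeT, tabT]
      · intro f st d
        rw [if_pos hR]
        exact ihr hR hnd.2.2.1 f st d
    have hfuel : 2 * sizeT (BT.nd node l r) + f =
        (2 * sizeT l + (2 * sizeT r + (1 + f))) + 1 := by
      simp only [sizeT]; ring
    rw [hfuel]
    simp only [runB, childB_eq, Bool.false_eq_true, if_false]
    rw [stepL, stepR]
    have : runB num links limit (1 + f)
        ((node, true) :: st) (tabT num links limit r (tabT num links limit l d)) =
        runB num links limit f st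
          ((tabT num links limit r (tabT num links limit l d)).insert node
            (combineB num links limit (tabT num links limit r (tabT num links limit l d)) node)) := by
      rw [(by omega : 1 + f = f + 1)]
      simp [runB]
    rw [this, combineB_eq num links limit node l r hl hr hnds]
    rfl

-- ===== parent map and tree existence =====

def ppAux : List (List Int) → Nat → Int → Int
  | [], _, _ => -2
  | row :: rest, i, x => if x ∈ row then (i : Int) else ppAux rest (i + 1) x

def pp (links : List (List Int)) (x : Int) : Int :=
  if x < 0 then -2 else ppAux links 0 x

theorem pp_neg (links : List (List Int)) (x : Int) (hx : x < 0) : pp links x = -2 := by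
  simp [pp, hx]

theorem ppAux_cases (x : Int) : ∀ (ls : List (List Int)) (i : Nat),
    ppAux ls i x = -2 ∨ ((i : Int) ≤ ppAux ls i x ∧ ppAux ls i x < (i : Int) + ls.length) := by
  intro ls
  induction ls with
  | nil => intro i; left; rfl
  | cons row rest ih =>
    intro i
    by_cases hm : x ∈ row
    · right
      simp only [ppAux, if_pos hm, List.length_cons]
      push_cast
      omega
    · rcases ih (i + 1) with h | h
      · left; simpa [ppAux, hm] using h
      · right
        simp only [ppAux, if_neg hm, List.length_cons]
        push_cast at h ⊢
        omega

theorem pp_cases (links : List (List Int)) (x : Int) :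
    pp links x = -2 ∨ (0 ≤ pp links x ∧ pp links x < (links.length : Int)) := by
  by_cases hx : x < 0
  · left; exact pp_neg links x hx
  · rcases ppAux_cases x links 0 with h | h
    · left; simp [pp, hx, h]
    · right; simp only [pp, if_neg hx]; push_cast at h; omega

theorem ppAux_not_found (x : Int) : ∀ (ls : List (List Int)) (i : Nat),
    (∀ row ∈ ls, x ∉ row) → ppAux ls i x = -2 := by
  intro ls
  induction ls with
  | nil => intro i _; rfl
  | cons row rest ih =>
    intro i h
    have h1 : x ∉ row := h row (by simp)
    simp only [ppAux, if_neg h1]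
    exact ih (i + 1) (fun r hr => h r (by simp [hr]))

theorem ppAux_spec (x : Int) : ∀ (ls : List (List Int)) (i : Nat) (j : Nat)
    (hj : j < ls.length), x ∈ ls[j] →
    (∀ j' (h : j' < ls.length), x ∈ ls[j'] → j' = j) → ppAux ls i x = (i : Int) + j := by
  intro ls
  induction ls with
  | nil => intro i j hj; simp at hj
  | cons row rest ih =>
    intro i j hj hmem huniq
    cases j with
    | zero =>
      simp only [List.getElem_cons_zero] at hmem
      simp [ppAux, hmem]
    | succ j =>
      have hrow : x ∉ row := by
        intro hx
        have := huniq 0 (by simp) (by simpa using hx)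
        omega
      simp only [ppAux, if_neg hrow]
      have := ih (i + 1) j (by simpa using Nat.lt_of_succ_lt_succ hj)
        (by simpa using hmem)
        (fun j' hj' hx => by
          have := huniq (j' + 1) (by simpa using Nat.succ_lt_succ hj') (by simpa using hx)
          omega)
      rw [this]; push_cast; ring

theorem elist_cons (row : List Int) (rest : List (List Int)) :
    Elist (row :: rest) = row.filter (fun x => x != -1) ++ Elist rest := by
  simp [Elist]

theorem mem_elist_iff (links : List (List Int)) (x : Int) :
    x ∈ Elist links ↔ x ≠ -1 ∧ ∃ row ∈ links, x ∈ row := by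
  simp [Elist, List.mem_filter, List.mem_flatten]
  tauto

-- a value ≠ -1 occurring in two rows contradicts Nodup of Elist
theorem unique_row (x : Int) (hx : x ≠ -1) : ∀ (ls : List (List Int)),
    (Elist ls).Nodup → ∀ (j1 j2 : Nat) (h1 : j1 < ls.length) (h2 : j2 < ls.length),
    x ∈ ls[j1] → x ∈ ls[j2] → j1 = j2 := by
  intro ls
  induction ls with
  | nil => intro _ j1 j2 h1; simp at h1
  | cons row rest ih =>
    intro hnd j1 j2 h1 h2 hm1 hm2
    rw [elist_cons, List.nodup_append] at hnd
    have key : ∀ j (hj : j < rest.length), x ∈ rest[j] → x ∉ row := by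
      intro j hj hmem hrow
      have hxf : x ∈ row.filter (fun x => x != -1) := by
        simp only [List.mem_filter, bne_iff_ne]; exact ⟨hrow, hx⟩
      have hxE : x ∈ Elist rest :=
        (mem_elist_iff rest x).2 ⟨hx, rest[j], List.getElem_mem hj, hmem⟩
      exact (hnd.2.2 x hxf x hxE) rfl
    cases j1 with
    | zero =>
      cases j2 with
      | zero => rfl
      | succ j2 =>
        exact absurd (by simpa using hm1)
          (key j2 (by simpa using h2) (by simpa using hm2))
    | succ j1 =>
      cases j2 with
      | zero =>
        exact absurd (by simpa using hm2)
          (key j1 (by simpa using h1) (by simpa using hm1))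
      | succ j2 =>
        have := ih hnd.2.1 j1 j2 (by simpa using h1) (by simpa using h2)
          (by simpa using hm1) (by simpa using hm2)
        omega

-- pp of a child is its (unique) parent
-- the child entry childA links node j sits in row node.toNat
theorem childA_mem_row (links : List (List Int)) (node j : Int)
    (hn0 : 0 ≤ node) (hn1 : node < (links.length : Int))
    (hj : j = 0 ∨ j = 1) (hrow : ∀ row ∈ links, row.length = 2) :
    ∃ (h : node.toNat < links.length), childA links node j ∈ links[node.toNat] := by
  have hlt : node.toNat < links.length := by omega
  refine ⟨hlt, ?_⟩
  have hrowlen : links[node.toNat].length = 2 := hrow _ (List.getElem_mem hlt)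
  have h1 : childA links node j = (links[node.toNat])[j.toNat]'(by omega) := by
    unfold childA
    rw [PySem.List.pyGetD_eq_getElem _ _ hn0 (by simpa using hn1),
      PySem.List.pyGetD_eq_getElem _ _ (by omega) (by simp [hrowlen]; omega)]
  rw [h1]
  exact List.getElem_mem _

theorem child_mem_elist (links : List (List Int)) (node j : Int)
    (hn0 : 0 ≤ node) (hn1 : node < (links.length : Int))
    (hj : j = 0 ∨ j = 1) (hrow : ∀ row ∈ links, row.length = 2)
    (hc : childA links node j ≠ -1) : childA links node j ∈ Elist links := by
  obtain ⟨hlt, hmem⟩ := childA_mem_row links node j hn0 hn1 hj hrow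
  exact (mem_elist_iff links _).2 ⟨hc, links[node.toNat], List.getElem_mem hlt, hmem⟩

theorem pp_child (links : List (List Int)) (node : Int) (j : Int)
    (hnd : (Elist links).Nodup)
    (hrange : ∀ x ∈ Elist links, 0 ≤ x ∧ x < (links.length : Int))
    (hn0 : 0 ≤ node) (hn1 : node < (links.length : Int))
    (hj : j = 0 ∨ j = 1) (hrow : ∀ row ∈ links, row.length = 2)
    (hc : childA links node j ≠ -1) :
    pp links (childA links node j) = node := by
  obtain ⟨hlt, hmem⟩ := childA_mem_row links node j hn0 hn1 hj hrow
  have hcE := child_mem_elist links node j hn0 hn1 hj hrow hc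
  have hc0 : 0 ≤ childA links node j := (hrange _ hcE).1
  have huniq : ∀ j' (h : j' < links.length), childA links node j ∈ links[j'] → j' = node.toNat :=
    fun j' h hm => unique_row _ hc links hnd j' node.toNat h hlt hm hmem
  have := ppAux_spec (childA links node j) links 0 node.toNat hlt hmem huniq
  simp only [pp, if_neg (by omega : ¬ childA links node j < 0)]
  rw [this]; omega

theorem pp_root (links : List (List Int)) (rt : Int) (h0 : 0 ≤ rt)
    (hmem : rt ∉ Elist links) : pp links rt = -2 := by
  have : ∀ row ∈ links, rt ∉ row := by
    intro row hr hx
    exact hmem ((mem_elist_iff links rt).2 ⟨by omega, row, hr, hx⟩)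
  simp only [pp, if_neg (by omega : ¬ rt < 0)]
  exact ppAux_not_found rt links 0 this

-- orbits of pp: a repeated value ≥ 0 is impossible on an orbit that reaches the root
theorem orb_period (g : Int → Int) (y : Int) (a b : Nat) (hab : g^[a] y = g^[b] y) :
    ∀ m, g^[a + m] y = g^[b + m] y := by
  intro m
  induction m with
  | zero => simpa using hab
  | succ m ih =>
    have : a + (m + 1) = (a + m) + 1 := by ring
    rw [this, (by ring : b + (m + 1) = (b + m) + 1),
      Function.iterate_succ_apply', Function.iterate_succ_apply', ih]

theorem orb_tail' (links : List (List Int)) (y : Int) (K : Nat) (rt : Int)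
    (hK : (pp links)^[K] y = rt) (hrt : pp links rt = -2) :
    ∀ m, (pp links)^[K + 1 + m] y = -2 := by
  intro m
  induction m with
  | zero => rw [(by omega : K + 1 + 0 = K + 1), Function.iterate_succ_apply', hK, hrt]
  | succ m ih =>
    rw [(by omega : K + 1 + (m + 1) = (K + 1 + m) + 1), Function.iterate_succ_apply', ih]
    exact pp_neg links _ (by norm_num)

theorem orb_tail (links : List (List Int)) (y : Int) (K : Nat) (rt : Int)
    (hK : (pp links)^[K] y = rt) (hrt : pp links rt = -2) :
    ∀ m, 1 ≤ m → (pp links)^[K + m] y = -2 := by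
  intro m hm
  have := orb_tail' links y K rt hK hrt (m - 1)
  rwa [(by omega : K + 1 + (m - 1) = K + m)] at this

theorem orb_no_repeat (links : List (List Int)) (y x rt : Int) (a b K : Nat)
    (hab : a < b) (ha : (pp links)^[a] y = x) (hb : (pp links)^[b] y = x) (hx : 0 ≤ x)
    (hK : (pp links)^[K] y = rt) (hrt0 : 0 ≤ rt) (hrt : pp links rt = -2) : False := by
  by_cases hKa : a ≤ K
  · have hper := orb_period (pp links) y a b (ha.trans hb.symm) (K - a)
    rw [(by omega : a + (K - a) = K), hK] at hper
    have := orb_tail links y K rt hK hrt (b - a) (by omega)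
    rw [(by omega : K + (b - a) = b + (K - a))] at this
    rw [this] at hper
    omega
  · have := orb_tail links y K rt hK hrt (a - K) (by omega)
    rw [(by omega : K + (a - K) = a), ha] at this
    omega

-- iterates strictly before the root hit are in [0, n)
theorem orb_mem_range (links : List (List Int)) (y rt : Int) (K : Nat)
    (hy0 : 0 ≤ y) (hy1 : y < (links.length : Int))
    (hK : (pp links)^[K] y = rt) (hrt0 : 0 ≤ rt) (hrt : pp links rt = -2) :
    ∀ i < K, 0 ≤ (pp links)^[i] y ∧ (pp links)^[i] y < (links.length : Int) := by
  intro i hi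
  induction i with
  | zero => simpa using ⟨hy0, hy1⟩
  | succ i ih =>
    have hprev := ih (by omega)
    rw [Function.iterate_succ_apply']
    rcases pp_cases links ((pp links)^[i] y) with h | h
    · exfalso
      have := orb_tail links y (i + 1) (-2)
        (by rw [Function.iterate_succ_apply', h]) (pp_neg links _ (by norm_num))
        (K - (i + 1)) (by omega)
      rw [(by omega : i + 1 + (K - (i + 1)) = K), hK] at this
      omega
    · exact h

theorem orb_bound (links : List (List Int)) (y rt : Int) (K : Nat)
    (hy0 : 0 ≤ y) (hy1 : y < (links.length : Int))
    (hK : (pp links)^[K] y = rt) (hmin : ∀ i < K, (pp links)^[i] y ≠ rt)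
    (hrt0 : 0 ≤ rt) (hrt : pp links rt = -2) : K ≤ links.length := by
  have hmem := orb_mem_range links y rt K hy0 hy1 hK hrt0 hrt
  have hnd : ((List.range K).map (fun i => ((pp links)^[i] y).toNat)).Nodup := by
    refine List.Nodup.map_on ?_ List.nodup_range
    intro i hi j hj hij
    simp only [List.mem_range] at hi hj
    rcases Nat.lt_trichotomy i j with h | h | h
    · exfalso
      have hvi := hmem i hi
      have hvj := hmem j hj
      exact orb_no_repeat links y ((pp links)^[i] y) rt i j K h rfl (by omega) hvi.1 hK hrt0 hrt
    · exact h
    · exfalso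
      have hvi := hmem i hi
      have hvj := hmem j hj
      exact orb_no_repeat links y ((pp links)^[j] y) rt j i K h rfl (by omega) hvj.1 hK hrt0 hrt
  have hsub : ((List.range K).map (fun i => ((pp links)^[i] y).toNat)) ⊆ List.range links.length := by
    intro z hz
    simp only [List.mem_map, List.mem_range] at hz ⊢
    obtain ⟨i, hi, rfl⟩ := hz
    have := hmem i hi
    omega
  have := (List.subperm_of_subset hnd hsub).length_le
  simpa using this

-- the two child slots of a row cannot hold the same non -1 value (Elist is Nodup)
theorem two_slots (links : List (List Int)) (x : Int)
    (hnd : (Elist links).Nodup) (hrow : ∀ row ∈ links, row.length = 2)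
    (hx0 : 0 ≤ x) (hx1 : x < (links.length : Int))
    (hL : childA links x 0 ≠ -1) (heq : childA links x 0 = childA links x 1) : False := by
  have hlt : x.toNat < links.length := by omega
  have hrowlen : links[x.toNat].length = 2 := hrow _ (List.getElem_mem hlt)
  obtain ⟨a, b, hab⟩ := List.length_eq_two.1 hrowlen
  have h0 : childA links x 0 = a := by
    unfold childA
    rw [PySem.List.pyGetD_eq_getElem _ _ hx0 (by simpa using hx1)]
    simp [hab]
  have h1 : childA links x 1 = b := by
    unfold childA
    rw [PySem.List.pyGetD_eq_getElem _ _ hx0 (by simpa using hx1)]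
    simp [hab, PySem.List.pyGetD]
  have hsub : (links[x.toNat].filter (fun z => z != -1)).Sublist (Elist links) :=
    (List.sublist_flatten_of_mem (List.getElem_mem hlt)).filter _
  have hndrow : (links[x.toNat].filter (fun z => z != -1)).Nodup := hnd.sublist hsub
  rw [hab] at hndrow
  rw [h0, h1] at heq
  rw [← heq] at hndrow
  have hbne : (a != -1) = true := by simpa using h0 ▸ hL
  rw [List.filter_cons, List.filter_cons, hbne] at hndrow
  simp at hndrow

-- existence of the dfs tree under Pre_
theorem build (num : List Int) (links : List (List Int))
    (hrow : ∀ row ∈ links, row.length = 2) (hnd : (Elist links).Nodup)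
    (hrange : ∀ x ∈ Elist links, 0 ≤ x ∧ x < (links.length : Int))
    (rt : Int) (hrt0 : 0 ≤ rt) (hrt1 : rt < (links.length : Int))
    (hrtE : rt ∉ Elist links) :
    ∀ (j : Nat) (x : Int) (kx : Nat), links.length - kx = j →
      0 ≤ x → x < (links.length : Int) →
      (pp links)^[kx] x = rt → (∀ i < kx, (pp links)^[i] x ≠ rt) →
      ∃ t, RepT links x t ∧ (nodesT t).Nodup ∧
        (∀ y ∈ nodesT t, 0 ≤ y ∧ y < (links.length : Int)) ∧
        (∀ y ∈ nodesT t, ∃ m, (pp links)^[m] y = x) := by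
  have hppr : pp links rt = -2 := pp_root links rt hrt0 hrtE
  intro j
  induction j using Nat.strong_induction_on with
  | _ j IH =>
    intro x kx hj hx0 hx1 hK hmin
    have hxne : x ≠ -1 := by omega
    -- recursive construction for a present child
    have hchild : ∀ (jj : Int), jj = 0 ∨ jj = 1 → childA links x jj ≠ -1 →
        ∃ t, RepT links (childA links x jj) t ∧ (nodesT t).Nodup ∧
          (∀ y ∈ nodesT t, 0 ≤ y ∧ y < (links.length : Int)) ∧
          (∀ y ∈ nodesT t, ∃ m, (pp links)^[m] y = childA links x jj) := by
      intro jj hjj hc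
      have hcE := child_mem_elist links x jj hx0 hx1 hjj hrow hc
      have hc0 := hrange _ hcE
      have hpc : pp links (childA links x jj) = x :=
        pp_child links x jj hnd hrange hx0 hx1 hjj hrow hc
      have hK' : (pp links)^[kx + 1] (childA links x jj) = rt := by
        rw [Function.iterate_succ_apply, hpc, hK]
      have hmin' : ∀ i < kx + 1, (pp links)^[i] (childA links x jj) ≠ rt := by
        intro i hi
        cases i with
        | zero =>
          simp only [Function.iterate_zero_apply]
          intro hbad
          exact hrtE (hbad ▸ hcE)
        | succ i =>
          rw [Function.iterate_succ_apply, hpc]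
          exact hmin i (by omega)
      have hKb' : kx + 1 ≤ links.length :=
        orb_bound links _ rt (kx + 1) hc0.1 hc0.2 hK' hmin' hrt0 hppr
      exact IH (links.length - (kx + 1)) (by omega) _ (kx + 1) rfl hc0.1 hc0.2 hK' hmin'
-- helpers for assembling the node
    have hpcL : childA links x 0 ≠ -1 → pp links (childA links x 0) = x :=
      fun hc => pp_child links x 0 hnd hrange hx0 hx1 (Or.inl rfl) hrow hc
    have hpcR : childA links x 1 ≠ -1 → pp links (childA links x 1) = x :=
      fun hc => pp_child links x 1 hnd hrange hx0 hx1 (Or.inr rfl) hrow hc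
    have hnotself : ∀ (c : Int), pp links c = x → ∀ (t : BT),
        (∀ y ∈ nodesT t, ∃ m, (pp links)^[m] y = c) → x ∉ nodesT t := by
      intro c hpc t hA hmemx
      obtain ⟨m, hm⟩ := hA x hmemx
      have hx2 : (pp links)^[m + 1] x = x := by
        rw [Function.iterate_succ_apply', hm, hpc]
      exact orb_no_repeat links x x rt 0 (m + 1) kx (by omega) rfl hx2 hx0 hK hrt0 hppr
    by_cases hL : childA links x 0 = -1 <;> by_cases hR : childA links x 1 = -1
    · refine ⟨BT.nd x BT.nil BT.nil,
        RepT.nd hxne (by rw [hL]; exact RepT.nil) (by rw [hR]; exact RepT.nil), ?_, ?_, ?_⟩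
      · simp [nodesT]
      · intro y hy; simp [nodesT] at hy; subst hy; exact ⟨hx0, hx1⟩
      · intro y hy; simp [nodesT] at hy; subst hy; exact ⟨0, rfl⟩
    · obtain ⟨tr, hrepr, hndr, hranger, hancr⟩ := hchild 1 (Or.inr rfl) hR
      refine ⟨BT.nd x BT.nil tr,
        RepT.nd hxne (by rw [hL]; exact RepT.nil) hrepr, ?_, ?_, ?_⟩
      · simp only [nodesT, List.nodup_cons, List.nil_append]
        exact ⟨hnotself _ (hpcR hR) tr hancr, hndr⟩
      · intro y hy
        simp only [nodesT, List.mem_cons, List.nil_append] at hy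
        rcases hy with rfl | hy
        · exact ⟨hx0, hx1⟩
        · exact hranger y hy
      · intro y hy
        simp only [nodesT, List.mem_cons, List.nil_append] at hy
        rcases hy with rfl | hy
        · exact ⟨0, rfl⟩
        · obtain ⟨m, hm⟩ := hancr y hy
          exact ⟨m + 1, by rw [Function.iterate_succ_apply', hm, hpcR hR]⟩
    · obtain ⟨tl, hrepl, hndl, hrangel, hancl⟩ := hchild 0 (Or.inl rfl) hL
      refine ⟨BT.nd x tl BT.nil,
        RepT.nd hxne hrepl (by rw [hR]; exact RepT.nil), ?_, ?_, ?_⟩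
      · simp only [nodesT, List.nodup_cons, List.append_nil]
        exact ⟨hnotself _ (hpcL hL) tl hancl, hndl⟩
      · intro y hy
        simp only [nodesT, List.mem_cons, List.append_nil] at hy
        rcases hy with rfl | hy
        · exact ⟨hx0, hx1⟩
        · exact hrangel y hy
      · intro y hy
        simp only [nodesT, List.mem_cons, List.append_nil] at hy
        rcases hy with rfl | hy
        · exact ⟨0, rfl⟩
        · obtain ⟨m, hm⟩ := hancl y hy
          exact ⟨m + 1, by rw [Function.iterate_succ_apply', hm, hpcL hL]⟩
    · obtain ⟨tl, hrepl, hndl, hrangel, hancl⟩ := hchild 0 (Or.inl rfl) hL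
      obtain ⟨tr, hrepr, hndr, hranger, hancr⟩ := hchild 1 (Or.inr rfl) hR
      have hdisj : ∀ y ∈ nodesT tl, y ∉ nodesT tr := by
        intro y hyl hyr
        obtain ⟨m1, hm1⟩ := hancl y hyl
        obtain ⟨m2, hm2⟩ := hancr y hyr
        have h1 : (pp links)^[m1 + 1] y = x := by
          rw [Function.iterate_succ_apply', hm1, hpcL hL]
        have h2 : (pp links)^[m2 + 1] y = x := by
          rw [Function.iterate_succ_apply', hm2, hpcR hR]
        have hKy : (pp links)^[kx + (m1 + 1)] y = rt := by
          rw [Function.iterate_add_apply, h1, hK]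
        rcases Nat.lt_trichotomy m1 m2 with h | h | h
        · exact orb_no_repeat links y x rt (m1 + 1) (m2 + 1) (kx + (m1 + 1))
            (by omega) h1 h2 hx0 hKy hrt0 hppr
        · subst h
          exact two_slots links x hnd hrow hx0 hx1 hL (hm1.symm.trans hm2)
        · exact orb_no_repeat links y x rt (m2 + 1) (m1 + 1) (kx + (m1 + 1))
            (by omega) h2 h1 hx0 hKy hrt0 hppr
      refine ⟨BT.nd x tl tr, RepT.nd hxne hrepl hrepr, ?_, ?_, ?_⟩
      · simp only [nodesT, List.nodup_cons, List.nodup_append]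
        refine ⟨?_, hndl, hndr, ?_⟩
        · intro hx'
          simp only [List.mem_append] at hx'
          rcases hx' with hx' | hx'
          · exact hnotself _ (hpcL hL) tl hancl hx'
          · exact hnotself _ (hpcR hR) tr hancr hx'
        · intro a ha b hb hab
          exact hdisj a ha (hab ▸ hb)
      · intro y hy
        simp only [nodesT, List.mem_cons, List.mem_append] at hy
        rcases hy with rfl | hy | hy
        · exact ⟨hx0, hx1⟩
        · exact hrangel y hy
        · exact hranger y hy
      · intro y hy
        simp only [nodesT, List.mem_cons, List.mem_append] at hy
        rcases hy with rfl | hy | hy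
        · exact ⟨0, rfl⟩
        · obtain ⟨m, hm⟩ := hancl y hy
          exact ⟨m + 1, by rw [Function.iterate_succ_apply', hm, hpcL hL]⟩
        · obtain ⟨m, hm⟩ := hancr y hy
          exact ⟨m + 1, by rw [Function.iterate_succ_apply', hm, hpcR hR]⟩

-- ===== assembly =====

theorem sizeT_eq_length (t : BT) : sizeT t = (nodesT t).length := by
  induction t with
  | nil => rfl
  | nd i l r ihl ihr => simp [sizeT, nodesT, ihl, ihr]; omega

theorem htT_le_sizeT (t : BT) : htT t ≤ sizeT t := by
  induction t with
  | nil => exact Nat.le_refl 0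
  | nd i l r ihl ihr => simp [htT, sizeT]; omega

theorem sizeT_le (links : List (List Int)) (t : BT) (hnd : (nodesT t).Nodup)
    (hrange : ∀ y ∈ nodesT t, 0 ≤ y ∧ y < (links.length : Int)) :
    sizeT t ≤ links.length := by
  have hndm : ((nodesT t).map Int.toNat).Nodup := by
    refine List.Nodup.map_on ?_ hnd
    intro a ha b hb hab
    have := hrange a ha
    have := hrange b hb
    omega
  have hsub : (nodesT t).map Int.toNat ⊆ List.range links.length := by
    intro z hz
    simp only [List.mem_map, List.mem_range] at hz ⊢
    obtain ⟨y, hy, rfl⟩ := hz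
    have := hrange y hy
    omega
  have := (List.subperm_of_subset hndm hsub).length_le
  rw [sizeT_eq_length]
  simpa using this

-- under Pre_, set(nodes) - used is the singleton of the unique root
theorem root_singleton (links : List (List Int))
    (hn : 1 ≤ links.length)
    (hone : ∃ u ∈ List.range links.length, ((u : Int) ∉ Elist links ∧
      ∀ v ∈ List.range links.length, ((v : Int) ∉ Elist links → v = u))) :
    ∃ u, PySem.Set.diff
        (PySem.Set.ofList (PySem.List.pyRange 0 (PySem.List.len links) 1)) (usedA links) = [u] ∧
      0 ≤ u ∧ u < (links.length : Int) ∧ u ∉ Elist links := by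
  have hofl : PySem.Set.ofList (PySem.List.pyRange 0 (PySem.List.len links) 1) =
      PySem.List.pyRange 0 (PySem.List.len links) 1 :=
    PySem.Set.ofList_eq_self_of_nodup _ (PySem.List.nodup_pyRange_one _ _)
  have hmemS : ∀ z : Int, z ∈ PySem.Set.diff
      (PySem.Set.ofList (PySem.List.pyRange 0 (PySem.List.len links) 1)) (usedA links) ↔
      (0 ≤ z ∧ z < (links.length : Int) ∧ z ∉ Elist links) := by
    intro z
    rw [PySem.Set.mem_diff, hofl]
    simp only [PySem.List.mem_pyRange_one, usedA]
    rw [PySem.Set.mem_ofList]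
    constructor
    · rintro ⟨⟨h1, h2⟩, h3⟩
      exact ⟨h1, by simpa [PySem.List.len_eq] using h2, h3⟩
    · rintro ⟨h1, h2, h3⟩
      exact ⟨⟨h1, by simpa [PySem.List.len_eq] using h2⟩, h3⟩
  have hndS : (PySem.Set.diff
      (PySem.Set.ofList (PySem.List.pyRange 0 (PySem.List.len links) 1)) (usedA links)).Nodup :=
    PySem.Set.nodup_diff _ _ (by rw [hofl]; exact PySem.List.nodup_pyRange_one _ _)
  obtain ⟨u0, hu0r, hu0E, hu0uniq⟩ := hone
  simp only [List.mem_range] at hu0r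
  -- uniqueness of a candidate root
  have huniq : ∀ u z : Int,
      (0 ≤ u ∧ u < (links.length : Int) ∧ u ∉ Elist links) →
      (0 ≤ z ∧ z < (links.length : Int) ∧ z ∉ Elist links) → u = z := by
    intro u z hu hz
    have h1 : u.toNat = u0 := hu0uniq u.toNat (by simp; omega)
      (by rw [(by omega : ((u.toNat : Int)) = u)]; exact hu.2.2)
    have h2 : z.toNat = u0 := hu0uniq z.toNat (by simp; omega)
      (by rw [(by omega : ((z.toNat : Int)) = z)]; exact hz.2.2)
    omega
  -- nonemptiness
  have hne : PySem.Set.diff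
      (PySem.Set.ofList (PySem.List.pyRange 0 (PySem.List.len links) 1)) (usedA links) ≠ [] := by
    intro hempty
    have : ((u0 : Int)) ∈ PySem.Set.diff
        (PySem.Set.ofList (PySem.List.pyRange 0 (PySem.List.len links) 1)) (usedA links) :=
      (hmemS _).2 ⟨by omega, by exact_mod_cast hu0r, hu0E⟩
    rw [hempty] at this
    exact absurd this (List.not_mem_nil)
  obtain ⟨u, S', hS⟩ := List.exists_cons_of_ne_nil hne
  have huS : u ∈ PySem.Set.diff
      (PySem.Set.ofList (PySem.List.pyRange 0 (PySem.List.len links) 1)) (usedA links) := by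
    rw [hS]; exact List.mem_cons_self
  have hu := (hmemS u).1 huS
  refine ⟨u, ?_, hu⟩
  rw [hS]
  rcases S' with _ | ⟨z, S''⟩
  · rfl
  · exfalso
    have hzS : z ∈ PySem.Set.diff
        (PySem.Set.ofList (PySem.List.pyRange 0 (PySem.List.len links) 1)) (usedA links) := by
      rw [hS]; exact List.mem_cons_of_mem _ List.mem_cons_self
    have hz := (hmemS z).1 hzS
    have : u = z := huniq u z hu hz
    rw [hS] at hndS
    simp [this] at hndS

theorem feas_eq (k : Int) (num : List Int) (links : List (List Int)) (rt : Int) (t : BT)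
    (h : RepT links rt t) (hrt0 : 0 ≤ rt) (hnd : (nodesT t).Nodup)
    (hsz : sizeT t ≤ links.length) :
    ∀ limit, feasibleA k num links rt limit = feasibleB k num links rt limit := by
  intro limit
  have hne : rt ≠ -1 := by omega
  obtain ⟨l, r, rfl, _, _⟩ := rep_of_ne links rt t h hne
  have hA : dfsA num links limit (links.length + 1) rt = dfsT num links limit (BT.nd rt l r) :=
    dfsA_eq_dfsT num links limit rt _ h (links.length + 1)
      (le_trans (htT_le_sizeT _) (by omega))
  have hfuel : 2 * links.length + 1 =
      2 * sizeT (BT.nd rt l r) + (2 * (links.length - sizeT (BT.nd rt l r)) + 1) := by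
    omega
  have hB := runB_step num links limit rt (BT.nd rt l r) h hne hnd
    (2 * (links.length - sizeT (BT.nd rt l r)) + 1) [] PySem.Dict.empty
  unfold feasibleA feasibleB
  rw [hA, hfuel, hB, runB_nil]
  simp only [tabT, PySem.Dict.getD_insert_self]

theorem bs_congr (k : Int) (num : List Int) (links : List (List Int)) (rt : Int)
    (hfe : ∀ m, feasibleA k num links rt m = feasibleB k num links rt m) :
    ∀ (fuel : Nat) (l r : Int),
      bsearchA k num links rt fuel l r = bsearchB k num links rt fuel l r := by
  intro fuel
  induction fuel with
  | zero => intro l r; rfl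
  | succ f ih =>
    intro l r
    simp only [bsearchA, bsearchB, hfe, ih]

-- ===== VERDICT (by name: the statement is the Claim_ definition above) =====
theorem solution_spec : Claim_equal_solution := by
  unfold Claim_equal_solution
  intro k num links _hdom hpre
  unfold Spec_solution
  obtain ⟨hn, hnum, hrow, hex, hrest⟩ := hpre
  rcases hrest with hdeg | ⟨hlen, hnd, hrange, hone⟩
  · -- empty search interval: neither side ever calls its feasibility test
    unfold solution solution_alt
    dsimp only
    have hf : (num.sum - (PySem.List.max? num id).getD 0).toNat + 1 = 1 := by omega
    rw [hf]
    have hlt : ¬ ((PySem.List.max? num id).getD 0 < num.sum) := by omega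
    simp only [bsearchA, bsearchB, if_neg hlt]
  · obtain ⟨u, hS, hu0, hu1, huE⟩ := root_singleton links hn hone
    have husedB : usedB links = usedA links := rfl
    obtain ⟨t, hrep, hndT, hrangeT, _⟩ :=
      build num links hrow hnd hrange u hu0 hu1 huE links.length u 0 (by omega) hu0 hu1
        (by simp) (by omega)
    have hsz := sizeT_le links t hndT hrangeT
    unfold solution solution_alt
    dsimp only
    rw [husedB, hS]
    simp only [List.headD]
    have hmin : (PySem.List.min? [u] id).getD 0 = u := rfl
    rw [hmin]
    exact bs_congr k num links u (feas_eq k num links u t hrep hu0 hndT hsz) _ _ _
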